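-- pv_equiv track=rewrite | github.com/ZachParent/py-demos | 2024-11-08-yusuf-interview.py | category_to_maximize_revenue
-- ===== SOURCE A (Python) =====
-- def category_to_maximize_revenue(items: list[str], category_dict: dict[str, str], revenue_dict: dict[str, int]) -> tuple[str, int]:
--     revenue_per_category = {}
--     for item in items:
--         category = category_dict[item]
--         if category not in revenue_per_category:
--             revenue_per_category[category] = 0
--         revenue_per_category[category] += revenue_dict[category]
--
--     max_revenue = 0
--     max_category = None
--     for category, revenue in revenue_per_category.items():
--         if revenue > max_revenue:
--             max_revenue = revenue
--             max_category = category
--     return max_category, max_revenue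
-- ===== SOURCE B (Python) =====
-- def category_to_maximize_revenue(items: list[str], category_dict: dict[str, str], revenue_dict: dict[str, int]) -> tuple[str, int]:
--     # No accumulation dict at all: first collect the distinct categories in
--     # first-seen order, then for each such category rescan the items and sum
--     # its unit revenue over the matching items, keeping the running maximum.
--     cats = []
--     for item in items:
--         c = category_dict[item]
--         if c not in cats:
--             cats.append(c)
--     best_category = None
--     best_revenue = 0
--     for c in cats:
--         revenue = sum(revenue_dict[c] for item in items if category_dict[item] == c)
--         if revenue > best_revenue:
--             best_revenue = revenue
--             best_category = c
--     return best_category, best_revenue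
-- ===== Notes on version B (the rewrite author's own statement) =====
-- stated objective: alternative
-- what changed: B keeps no revenue map at all: it builds the first-seen-order list of distinct categories and then, for each category, rescans the whole items list summing its unit revenue over matching items (nested scans, O(n*k)) instead of A's single-pass dict accumulation.
-- outside the precondition, e.g. on category_to_maximize_revenue(['a'], {'a': 'c'}, {'c': -2}): A returns (None, 0), B returns (None, 0); on category_to_maximize_revenue([], {}, {}): A returns (None, 0), B returns (None, 0)
import Mathlib
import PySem

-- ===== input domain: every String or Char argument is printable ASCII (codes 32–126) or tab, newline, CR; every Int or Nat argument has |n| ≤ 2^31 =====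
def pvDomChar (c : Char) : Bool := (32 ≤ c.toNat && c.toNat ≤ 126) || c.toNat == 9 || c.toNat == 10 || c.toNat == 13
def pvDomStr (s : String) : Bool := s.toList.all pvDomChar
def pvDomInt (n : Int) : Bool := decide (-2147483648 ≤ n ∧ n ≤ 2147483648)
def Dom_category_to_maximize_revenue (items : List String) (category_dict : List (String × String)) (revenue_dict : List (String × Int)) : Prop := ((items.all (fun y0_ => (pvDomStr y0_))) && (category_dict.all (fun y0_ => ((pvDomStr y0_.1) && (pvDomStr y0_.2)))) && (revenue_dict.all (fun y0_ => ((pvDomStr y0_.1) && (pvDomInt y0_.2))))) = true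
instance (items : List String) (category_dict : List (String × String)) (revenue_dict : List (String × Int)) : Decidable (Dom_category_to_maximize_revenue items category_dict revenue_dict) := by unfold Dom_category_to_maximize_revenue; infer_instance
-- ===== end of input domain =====

-- B keeps no accumulation dict: it collects the distinct categories in first-seen order,
-- then rescans the items per category summing unit revenue (nested scans; alternative, not faster).


-- ===== PORT A =====
-- Literal port of A.  Inside Pre_ every dict lookup succeeds, so `getD … ""` /
-- `getD … 0` (KeyError = none is excluded by Pre_) and the final `.getD ""` on the
-- Optional max_category (None is excluded by Pre_) never see their defaults.
def category_to_maximize_revenue (items : List String) (category_dict : List (String × String)) (revenue_dict : List (String × Int)) : String × Int :=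
  let rpc := items.foldl (fun d item =>
      let category := (PySem.Dict.ofList category_dict).getD item ""
      let d := if d.contains category then d else d.insert category (0 : Int)
      d.insert category (d.getD category 0 + (PySem.Dict.ofList revenue_dict).getD category 0))
    PySem.Dict.empty
  let st := rpc.items.foldl (fun (s : Int × Option String) p =>
      if p.2 > s.1 then (p.2, some p.1) else s) ((0 : Int), (none : Option String))
  (st.2.getD "", st.1)

-- ===== PORT B =====
def category_to_maximize_revenue_alt (items : List String) (category_dict : List (String × String)) (revenue_dict : List (String × Int)) : String × Int :=
  let cats := items.foldl (fun (acc : List String) item =>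
      let c := (PySem.Dict.ofList category_dict).getD item ""
      if acc.contains c then acc else acc ++ [c]) []
  let st := cats.foldl (fun (s : Int × Option String) c =>
      let revenue := items.foldl (fun (r : Int) item =>
          if ((PySem.Dict.ofList category_dict).getD item "" == c)
          then r + (PySem.Dict.ofList revenue_dict).getD c 0 else r) 0
      if revenue > s.1 then (revenue, some c) else s) ((0 : Int), (none : Option String))
  (st.2.getD "", st.1)

-- ===== PRECONDITION & SPEC =====
-- Pre_ excludes exactly the inputs where the Python A does not return a String × Int
-- value: a KeyError (some item missing from category_dict, or its category missing
-- from revenue_dict), and the inputs where no category's aggregated revenue is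
-- positive, on which A (and B) return (None, 0) — None is not a value of the
-- declared str type.
def Pre_category_to_maximize_revenue (items : List String) (category_dict : List (String × String)) (revenue_dict : List (String × Int)) : Prop :=
  (∀ item ∈ items, ∃ c, (PySem.Dict.ofList category_dict).get? item = some c ∧
      ((PySem.Dict.ofList revenue_dict).get? c).isSome) ∧
  (∃ item ∈ items, ∃ c, (PySem.Dict.ofList category_dict).get? item = some c ∧
      0 < (PySem.Dict.ofList revenue_dict).getD c 0)
instance (items : List String) (category_dict : List (String × String)) (revenue_dict : List (String × Int)) : Decidable (Pre_category_to_maximize_revenue items category_dict revenue_dict) := by unfold Pre_category_to_maximize_revenue; infer_instance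

def pvWitness_category_to_maximize_revenue : List String × (List (String × String)) × (List (String × Int)) :=
  (["a"], [("a", "c")], [("c", 5)])

def Spec_category_to_maximize_revenue (items : List String) (category_dict : List (String × String)) (revenue_dict : List (String × Int)) (out : String × Int) : Prop := out = category_to_maximize_revenue_alt items category_dict revenue_dict
instance (items : List String) (category_dict : List (String × String)) (revenue_dict : List (String × Int)) (out : String × Int) : Decidable (Spec_category_to_maximize_revenue items category_dict revenue_dict out) := by unfold Spec_category_to_maximize_revenue; infer_instance

-- ===== CLAIM (what is proved, stated in full; the proofs are below) =====
def Claim_equal_category_to_maximize_revenue : Prop := ∀ (items : List String) (category_dict : List (String × String)) (revenue_dict : List (String × Int)), Dom_category_to_maximize_revenue items category_dict revenue_dict → Pre_category_to_maximize_revenue items category_dict revenue_dict → Spec_category_to_maximize_revenue items category_dict revenue_dict (category_to_maximize_revenue items category_dict revenue_dict)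

-- ===== LEMMAS AND PROOFS =====

-- membership in B's first-seen dedup fold = membership in the scanned list
theorem mem_dedup_foldl (cs : List String) (acc : List String) (x : String) :
    (x ∈ cs.foldl (fun (a : List String) c => if a.contains c then a else a ++ [c]) acc)
      ↔ x ∈ acc ∨ x ∈ cs := by
  induction cs generalizing acc with
  | nil => simp
  | cons c cs ih =>
    simp only [List.foldl_cons]
    by_cases h : acc.contains c
    · have hc : c ∈ acc := by simpa using h
      simp only [h, if_true, ih, List.mem_cons]
      constructor
      · rintro (hx | hx)
        · exact Or.inl hx
        · exact Or.inr (Or.inr hx)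
      · rintro (hx | hx | hx)
        · exact Or.inl hx
        · exact Or.inl (hx ▸ hc)
        · exact Or.inr hx
    · simp only [h, Bool.false_eq_true, if_false, ih, List.mem_append, List.mem_cons]
      tauto

-- lookups in a dict whose items are a pointwise map over a key list
theorem getD_mk_keymap (g : String → Int) (acc : List String) (c : String) :
    (PySem.Dict.mk (acc.map (fun x => (x, g x)))).getD c 0
      = if c ∈ acc then g c else 0 := by
  induction acc with
  | nil =>
    rw [List.map_nil, show (PySem.Dict.mk ([] : List (String × Int))) = PySem.Dict.empty from rfl]
    simp
  | cons a acc ih =>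
    rw [PySem.Dict.getD_eq_get?_getD, List.map_cons, PySem.Dict.get?_mk_cons]
    by_cases h : a = c
    · subst h; simp
    · have hb : (a == c) = false := by simpa using h
      simp only [hb, Bool.false_eq_true, if_false, ← PySem.Dict.getD_eq_get?_getD, ih]
      simp [List.mem_cons, Ne.symm h]

theorem contains_mk_keymap (g : String → Int) (acc : List String) (c : String) :
    (PySem.Dict.mk (acc.map (fun x => (x, g x)))).contains c = acc.contains c := by
  induction acc with
  | nil =>
    rw [List.map_nil, show (PySem.Dict.mk ([] : List (String × Int))) = PySem.Dict.empty from rfl]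
    simp
  | cons a acc ih =>
    rw [PySem.Dict.contains_eq_isSome_get?, List.map_cons, PySem.Dict.get?_mk_cons]
    by_cases h : a = c
    · subst h; simp
    · have hb : (a == c) = false := by simpa using h
      simp only [hb, Bool.false_eq_true, if_false, ← PySem.Dict.contains_eq_isSome_get?, ih]
      simp [List.contains_cons, hb, show ¬c = a from fun hca => h hca.symm]

-- the A-side step without the explicit "initialise to 0" branch
theorem stepA_eq (d : PySem.Dict String Int) (c : String) (v : Int) :
    (let d' := if d.contains c then d else d.insert c (0 : Int)
     d'.insert c (d'.getD c 0 + v)) = d.insert c (d.getD c 0 + v) := by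
  by_cases h : d.contains c
  · simp [h]
  · simp only [h, Bool.false_eq_true, if_false]
    rw [PySem.Dict.getD_insert_self, PySem.Dict.insert_insert_self,
        PySem.Dict.getD_of_not_contains _ _ (by simpa using h)]

-- the items of A's accumulation dict ARE B's dedup list paired with count·unit-revenue
theorem accum_items (f : String → Int) (cs : List String) :
    (cs.foldl (fun (d : PySem.Dict String Int) c => d.insert c (d.getD c 0 + f c))
        PySem.Dict.empty).items
      = (cs.foldl (fun (a : List String) c => if a.contains c then a else a ++ [c]) []).map
          (fun c => (c, (cs.count c : Int) * f c)) := by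
  induction cs using List.reverseRecOn with
  | nil => rfl
  | append_singleton cs c ih =>
    rw [List.foldl_append, List.foldl_append, List.foldl_cons, List.foldl_nil,
        List.foldl_cons, List.foldl_nil]
    set Acc := cs.foldl (fun (a : List String) c => if a.contains c then a else a ++ [c]) []
      with hAcc
    set D := cs.foldl (fun (d : PySem.Dict String Int) c => d.insert c (d.getD c 0 + f c))
      PySem.Dict.empty with hD
    have hDmk : D = PySem.Dict.mk (Acc.map (fun x => (x, (cs.count x : Int) * f x))) :=
      PySem.Dict.ext (by simpa using ih)
    have hcont : D.contains c = Acc.contains c := by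
      rw [hDmk]; exact contains_mk_keymap _ Acc c
    have hgetD : D.getD c 0 = if c ∈ Acc then (cs.count c : Int) * f c else 0 := by
      rw [hDmk]; exact getD_mk_keymap _ Acc c
    by_cases hmem : c ∈ Acc
    · have hc : Acc.contains c = true := by simpa using hmem
      have hDc : D.contains c = true := hcont.trans hc
      rw [if_pos hc, PySem.Dict.items_insert, hDc, if_pos rfl, ih, List.map_map]
      apply List.map_congr_left
      intro x _
      by_cases hx : x = c
      · subst hx
        have : (cs ++ [x]).count x = cs.count x + 1 := by simp
        simp only [Function.comp, beq_self_eq_true, if_pos, hgetD, if_pos hmem, this]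
        push_cast; ring_nf
      · have hb : (x == c) = false := by simpa using hx
        have : (cs ++ [c]).count x = cs.count x := by
          simp [List.count_singleton, show ¬c = x from fun e => hx e.symm]
        simp [Function.comp, hb, this]
    · have hc : Acc.contains c = false := by simpa using hmem
      have hDc : D.contains c = false := hcont.trans hc
      have hcs : c ∉ cs := fun h => hmem (by
        rw [hAcc]; exact (mem_dedup_foldl cs [] c).2 (Or.inr h))
      rw [if_neg (by simpa using hmem), PySem.Dict.items_insert, hDc, if_neg (by simp), ih,
          List.map_append]
      congr 1
      · apply List.map_congr_left
        intro x hxA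
        have hx : x ≠ c := fun h => hmem (h ▸ hxA)
        have : (cs ++ [c]).count x = cs.count x := by
          simp [List.count_singleton, show ¬c = x from fun e => hx e.symm]
        simp [this]
      · have h0 : cs.count c = 0 := List.count_eq_zero.2 hcs
        have : (cs ++ [c]).count c = 1 := by simp [h0]
        simp [hgetD, if_neg hmem, this, h0]

-- B's inner rescan sums to count · unit-revenue
theorem foldl_if_count (cl : List String) (c : String) (v : Int) (s : Int) :
    cl.foldl (fun (r : Int) x => if (x == c) then r + v else r) s
      = s + (cl.count c : Int) * v := by
  induction cl generalizing s with
  | nil => simp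
  | cons a cl ih =>
    rw [List.foldl_cons, ih, List.count_cons]
    by_cases h : a = c
    · subst h; simp; ring
    · have hb : (a == c) = false := by simpa using h
      simp [hb]

-- ===== VERDICT (by name: the statement is the Claim_ definition above) =====
theorem category_to_maximize_revenue_spec : Claim_equal_category_to_maximize_revenue := by
  intro items category_dict revenue_dict _ _
  unfold Spec_category_to_maximize_revenue
  unfold category_to_maximize_revenue category_to_maximize_revenue_alt
  simp only []
  have hA : (items.foldl (fun d item =>
        let category := (PySem.Dict.ofList category_dict).getD item ""
        let d := if d.contains category then d else d.insert category (0 : Int)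
        d.insert category (d.getD category 0 + (PySem.Dict.ofList revenue_dict).getD category 0))
      PySem.Dict.empty)
      = (items.map (fun item => (PySem.Dict.ofList category_dict).getD item "")).foldl
          (fun d c => d.insert c (d.getD c 0 + (PySem.Dict.ofList revenue_dict).getD c 0))
          PySem.Dict.empty := by
    rw [List.foldl_map]
    congr 1
    funext d item
    exact stepA_eq d ((PySem.Dict.ofList category_dict).getD item "")
      ((PySem.Dict.ofList revenue_dict).getD ((PySem.Dict.ofList category_dict).getD item "") 0)
  have hB : (items.foldl (fun (acc : List String) item =>
        let c := (PySem.Dict.ofList category_dict).getD item ""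
        if acc.contains c then acc else acc ++ [c]) [])
      = (items.map (fun item => (PySem.Dict.ofList category_dict).getD item "")).foldl
          (fun (a : List String) c => if a.contains c then a else a ++ [c]) [] := by
    rw [List.foldl_map]
  have hrev : (fun (s : Int × Option String) c =>
        let revenue := items.foldl (fun (r : Int) item =>
            if ((PySem.Dict.ofList category_dict).getD item "" == c)
            then r + (PySem.Dict.ofList revenue_dict).getD c 0 else r) 0
        if revenue > s.1 then (revenue, some c) else s)
      = (fun (s : Int × Option String) c =>
        if (((items.map (fun item => (PySem.Dict.ofList category_dict).getD item "")).count c : Int)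
              * (PySem.Dict.ofList revenue_dict).getD c 0) > s.1
        then ((((items.map (fun item => (PySem.Dict.ofList category_dict).getD item "")).count c : Int)
              * (PySem.Dict.ofList revenue_dict).getD c 0), some c) else s) := by
    funext s c
    rw [show (items.foldl (fun (r : Int) item =>
          if ((PySem.Dict.ofList category_dict).getD item "" == c)
          then r + (PySem.Dict.ofList revenue_dict).getD c 0 else r) 0)
        = (items.map (fun item => (PySem.Dict.ofList category_dict).getD item "")).foldl
            (fun (r : Int) x => if (x == c) then r + (PySem.Dict.ofList revenue_dict).getD c 0 else r) 0
        from (List.foldl_map (f := fun item => (PySem.Dict.ofList category_dict).getD item "")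
          (g := fun (r : Int) x => if (x == c) then r + (PySem.Dict.ofList revenue_dict).getD c 0 else r)
          (l := items) (init := (0 : Int))).symm,
      foldl_if_count, zero_add]
  rw [hA, hB, accum_items, List.foldl_map, hrev]
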